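-- pv_equiv track=rewrite | github.com/jpcima/Hera | Scripts/faust.py | add_method_start_end
-- ===== SOURCE A (Python) =====
-- def add_method_start_end(text, method):
--     lines = text.split('\n')
--     new_lines = []
--     in_method = False
--     eom = None
--     for i in range(len(lines)):
--         line = lines[i]
--         stripped = line.strip()
--         if in_method:
--             if line.rstrip() == eom:
--                 new_lines.append('\t\t// END %s //' % (method))
--                 in_method = False
--             new_lines.append(line)
--         else:
--             new_lines.append(line)
--             if method + '(' in stripped and stripped.endswith('{'):
--                 in_method = True
--                 new_lines.append('\t\t// BEGIN %s //' % (method))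
--                 eom = ''
--                 for ch in line:
--                     if ch in ('\t', ' '):
--                         eom += ch
--                     else:
--                         break
--                 eom += '}'
--     return '\n'.join(new_lines)
-- ===== SOURCE B (Python) =====
-- def add_method_start_end(text, method):
--     lines = text.split('\n')
--     out = []
--     rest = lines
--     while True:
--         k = next((i for i, ln in enumerate(rest)
--                   if method + '(' in ln.strip() and ln.strip().endswith('{')), None)
--         if k is None:
--             out.extend(rest)
--             break
--         trig = rest[k]
--         sentinel = trig[:len(trig) - len(trig.lstrip(' \t'))] + '}'
--         body = rest[k + 1:]
--         out.extend(rest[:k + 1])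
--         out.append('\t\t// BEGIN %s //' % method)
--         j = next((i for i, ln in enumerate(body) if ln.rstrip() == sentinel), None)
--         if j is None:
--             out.extend(body)
--             break
--         out.extend(body[:j])
--         out.append('\t\t// END %s //' % method)
--         out.append(body[j])
--         rest = body[j + 1:]
--     return '\n'.join(out)
-- ===== Notes on version B (the rewrite author's own statement) =====
-- stated objective: alternative
-- what changed: Replaces A's per-line boolean state machine (in_method flag with carried eom string) by segment extraction: repeatedly find the next trigger line's index with next(enumerate(...)), find the sentinel closing-brace line's index in the remainder, and splice the slices together with the BEGIN/END markers.
import Mathlib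
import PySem

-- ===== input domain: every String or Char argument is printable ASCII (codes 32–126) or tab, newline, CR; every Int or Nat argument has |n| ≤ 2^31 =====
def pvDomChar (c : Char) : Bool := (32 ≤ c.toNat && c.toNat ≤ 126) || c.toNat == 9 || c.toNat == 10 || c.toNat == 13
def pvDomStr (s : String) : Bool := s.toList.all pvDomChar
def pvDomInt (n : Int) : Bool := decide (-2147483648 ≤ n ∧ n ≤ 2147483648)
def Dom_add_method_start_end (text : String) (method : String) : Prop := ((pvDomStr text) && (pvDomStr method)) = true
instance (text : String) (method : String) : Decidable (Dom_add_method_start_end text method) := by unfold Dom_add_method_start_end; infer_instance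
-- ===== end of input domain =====

-- B replaces A's per-line flag state machine by segment extraction: repeatedly find the next
-- trigger line by index search, then find the sentinel line in the remainder, and splice the
-- segments with the markers (alternative decomposition, same cost).

-- ===== PORT A =====
-- the inner 'for ch in line: … break' loop building eom
def amseEomGo : List Char → String → String
  | [], eom => eom
  | c :: cs, eom => if c = '\t' ∨ c = ' ' then amseEomGo cs (eom.push c) else eom

-- one iteration of A's 'for i in range(len(lines))' loop; state = (new_lines, in_method, eom)
def amseStep (method : String) : List String × Bool × Option String → String →
    List String × Bool × Option String
  | (new_lines, in_method, eom), line =>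
    let stripped := PySem.Str.strip line
    if in_method then
      if some (PySem.Str.rstrip line) == eom then
        (new_lines ++ ["\t\t// END " ++ method ++ " //", line], false, eom)
      else
        (new_lines ++ [line], in_method, eom)
    else
      let new_lines := new_lines ++ [line]
      if PySem.Str.isIn (method ++ "(") stripped && PySem.Str.endswith stripped "{" then
        (new_lines ++ ["\t\t// BEGIN " ++ method ++ " //"], true,
          some ((amseEomGo line.toList "").push '}'))
      else
        (new_lines, in_method, eom)

def add_method_start_end (text : String) (method : String) : String :=
  PySem.Str.join "\n"
    ((PySem.List.pyRange 0
        (PySem.List.len ((PySem.Chars.splitOn text.toList ['\n']).map (fun cs => String.ofList cs))) 1).foldl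
      (fun acc j => amseStep method acc
        (PySem.List.pyGetD ((PySem.Chars.splitOn text.toList ['\n']).map (fun cs => String.ofList cs)) j ""))
      ([], false, none)).1

-- ===== PORT B =====
-- the trigger test: method+'(' in ln.strip() and ln.strip().endswith('{')
def bTrig (method : String) (ln : String) : Bool :=
  PySem.Str.isIn (method ++ "(") (PySem.Str.strip ln) && PySem.Str.endswith (PySem.Str.strip ln) "{"

-- sentinel = trig[:len(trig) - len(trig.lstrip(' \t'))] + '}'
-- hand port: lstrip(' \t') is dropWhile; the slice bound k satisfies 0 ≤ k ≤ len(trig), so trig[:k] is take k (exact)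
def bSentinel (line : String) : String :=
  let cs := line.toList
  String.ofList (cs.take (cs.length - (cs.dropWhile (fun c => c == ' ' || c == '\t')).length)) ++ "}"

-- B's while loop: each round finds the next trigger index k (next(... enumerate ...) → findIdx?),
-- the sentinel index j in the body, and splices the slices; 'rest' strictly shrinks each round,
-- so fuel = initial length is a pure totality guard (never exhausted).
-- slices rest[:k+1], rest[k+1:], body[:j], body[j+1:] are take/drop (indices in range, exact);
-- rest[k], body[j] are getD with k, j in range (exact).
def bEmit (method : String) : Nat → List String → List String
  | 0, rest => rest
  | fuel + 1, rest =>
    match rest.findIdx? (bTrig method) with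
    | none => rest
    | some k =>
      let sentinel := bSentinel (rest.getD k "")
      let body := rest.drop (k + 1)
      match body.findIdx? (fun ln => PySem.Str.rstrip ln == sentinel) with
      | none => rest.take (k + 1) ++ ["\t\t// BEGIN " ++ method ++ " //"] ++ body
      | some j =>
        rest.take (k + 1) ++ ["\t\t// BEGIN " ++ method ++ " //"] ++ body.take j
          ++ ["\t\t// END " ++ method ++ " //", body.getD j ""]
          ++ bEmit method fuel (body.drop (j + 1))

def add_method_start_end_alt (text : String) (method : String) : String :=
  PySem.Str.join "\n"
    (bEmit method ((PySem.Chars.splitOn text.toList ['\n']).map (fun cs => String.ofList cs)).length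
      ((PySem.Chars.splitOn text.toList ['\n']).map (fun cs => String.ofList cs)))

-- ===== PRECONDITION & SPEC =====
def Spec_add_method_start_end (text : String) (method : String) (out : String) : Prop := out = add_method_start_end_alt text method
instance (text : String) (method : String) (out : String) : Decidable (Spec_add_method_start_end text method out) := by unfold Spec_add_method_start_end; infer_instance

-- ===== CLAIM (what is proved, stated in full; the proofs are below) =====
def Claim_equal_add_method_start_end : Prop := ∀ (text : String) (method : String), Dom_add_method_start_end text method → Spec_add_method_start_end text method (add_method_start_end text method)

-- ===== LEMMAS AND PROOFS =====

-- proof-side intermediate: the same output described by one structural recursion with a mode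
-- (none = outside any method body, some e = inside a body whose closing sentinel is e)
def bmse (method : String) : Option String → List String → List String
  | _, [] => []
  | none, line :: rest =>
    if bTrig method line then
      line :: ("\t\t// BEGIN " ++ method ++ " //") :: bmse method (some (bSentinel line)) rest
    else
      line :: bmse method none rest
  | some e, line :: rest =>
    if PySem.Str.rstrip line == e then
      ("\t\t// END " ++ method ++ " //") :: line :: bmse method none rest
    else
      line :: bmse method (some e) rest

-- A's char loop builds exactly the leading run of tabs/spaces
theorem amseEomGo_toList (cs : List Char) (acc : String) :
    (amseEomGo cs acc).toList = acc.toList ++ cs.takeWhile (fun c => c == ' ' || c == '\t') := by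
  induction cs generalizing acc with
  | nil => simp [amseEomGo]
  | cons c cs ih =>
    by_cases h : c = '\t' ∨ c = ' '
    · have hb : (c == ' ' || c == '\t') = true := by
        rcases h with h | h <;> simp [h]
      simp [amseEomGo, h, ih, List.takeWhile_cons, hb]
    · have hb : (c == ' ' || c == '\t') = false := by
        push_neg at h
        simp [h.1, h.2]
      simp [amseEomGo, h, List.takeWhile_cons, hb]

-- A's eom equals B's sentinel
theorem eom_eq_sentinel (line : String) :
    ((amseEomGo line.toList "").push '}') = bSentinel line := by
  have h0 := congrArg List.length
    (List.takeWhile_append_dropWhile (p := fun c => c == ' ' || c == '\t') (l := line.toList))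
  simp only [List.length_append] at h0
  have hlen : line.toList.length -
      (line.toList.dropWhile (fun c => c == ' ' || c == '\t')).length
      = (line.toList.takeWhile (fun c => c == ' ' || c == '\t')).length := by omega
  have htake : line.toList.take
      (line.toList.length - (line.toList.dropWhile (fun c => c == ' ' || c == '\t')).length)
      = line.toList.takeWhile (fun c => c == ' ' || c == '\t') := by
    rw [hlen]
    exact (List.prefix_iff_eq_take.mp (List.takeWhile_prefix _)).symm
  apply String.ext
  simp only [bSentinel]
  simp only [String.toList_append, String.toList_push, amseEomGo_toList]
  simpa [String.toList_ofList] using htake.symm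

-- the invariant: A's fold from state (acc, false, e?) / (acc, true, some e) produces acc ++ the recursions
theorem foldA_eq_bmse (method : String) (lines : List String) :
    (∀ (acc : List String) (e? : Option String),
      (lines.foldl (amseStep method) (acc, false, e?)).1 = acc ++ bmse method none lines) ∧
    (∀ (acc : List String) (e : String),
      (lines.foldl (amseStep method) (acc, true, some e)).1 = acc ++ bmse method (some e) lines) := by
  induction lines with
  | nil => simp [bmse]
  | cons line rest ih =>
    constructor
    · intro acc e?
      by_cases h : (PySem.Str.isIn (method ++ "(") (PySem.Str.strip line)
          && PySem.Str.endswith (PySem.Str.strip line) "{") = true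
      · rw [List.foldl_cons,
          show amseStep method (acc, false, e?) line
            = ((acc ++ [line]) ++ ["\t\t// BEGIN " ++ method ++ " //"], true,
                some ((amseEomGo line.toList "").push '}')) by
            rw [amseStep]
            rw [if_neg Bool.false_ne_true, if_pos h]]
        rw [ih.2, eom_eq_sentinel, show bmse method none (line :: rest)
            = line :: ("\t\t// BEGIN " ++ method ++ " //") :: bmse method (some (bSentinel line)) rest by
          rw [bmse]; rw [if_pos (show bTrig method line = true by rw [bTrig]; exact h)]]
        simp
      · replace h : (PySem.Str.isIn (method ++ "(") (PySem.Str.strip line)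
            && PySem.Str.endswith (PySem.Str.strip line) "{") = false := by simpa using h
        rw [List.foldl_cons,
          show amseStep method (acc, false, e?) line = (acc ++ [line], false, e?) by
            rw [amseStep]
            rw [if_neg Bool.false_ne_true, if_neg (by rw [h]; exact Bool.false_ne_true)]]
        rw [ih.1, show bmse method none (line :: rest) = line :: bmse method none rest by
          rw [bmse]; rw [if_neg (by rw [bTrig, h]; exact Bool.false_ne_true)]]
        simp
    · intro acc e
      by_cases h : PySem.Str.rstrip line = e
      · rw [List.foldl_cons,
          show amseStep method (acc, true, some e) line
            = (acc ++ ["\t\t// END " ++ method ++ " //", line], false, some e) by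
            rw [amseStep]
            rw [if_pos rfl, if_pos (by simp only [beq_iff_eq, Option.some.injEq]; exact h)]]
        rw [ih.1, show bmse method (some e) (line :: rest)
            = ("\t\t// END " ++ method ++ " //") :: line :: bmse method none rest by
          rw [bmse]; rw [if_pos (by simp [h])]]
        simp
      · rw [List.foldl_cons,
          show amseStep method (acc, true, some e) line = (acc ++ [line], true, some e) by
            rw [amseStep]
            rw [if_pos rfl, if_neg (by simp only [beq_iff_eq, Option.some.injEq]; exact h)]]
        rw [ih.2, show bmse method (some e) (line :: rest) = line :: bmse method (some e) rest by
          rw [bmse]; rw [if_neg (by simp only [beq_iff_eq]; exact h)]]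
        simp

-- bmse in mode none copies every line while no trigger appears
theorem bmse_none_all_neg (method : String) (ls : List String)
    (h : ∀ ln ∈ ls, bTrig method ln = false) : bmse method none ls = ls := by
  induction ls with
  | nil => rw [bmse]
  | cons line rest ih =>
    rw [bmse, if_neg (by rw [h line (List.mem_cons_self)]; exact Bool.false_ne_true),
      ih fun ln hln => h ln (List.mem_cons_of_mem _ hln)]

-- bmse in mode none up to and including the first trigger line
theorem bmse_none_append_trig (method t : String) (pre rest : List String)
    (hpre : ∀ ln ∈ pre, bTrig method ln = false) (ht : bTrig method t = true) :
    bmse method none (pre ++ t :: rest)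
      = pre ++ t :: ("\t\t// BEGIN " ++ method ++ " //") :: bmse method (some (bSentinel t)) rest := by
  induction pre with
  | nil => simp only [List.nil_append]; rw [bmse, if_pos ht]
  | cons p pre ih =>
    simp only [List.cons_append]
    rw [bmse, if_neg (by rw [hpre p (List.mem_cons_self)]; exact Bool.false_ne_true),
      ih fun ln hln => hpre ln (List.mem_cons_of_mem _ hln)]

-- bmse in mode some copies every line while the sentinel does not appear
theorem bmse_some_all_neg (method e : String) (ls : List String)
    (h : ∀ ln ∈ ls, (PySem.Str.rstrip ln == e) = false) : bmse method (some e) ls = ls := by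
  induction ls with
  | nil => rw [bmse]
  | cons line rest ih =>
    rw [bmse, if_neg (by rw [h line (List.mem_cons_self)]; exact Bool.false_ne_true),
      ih fun ln hln => h ln (List.mem_cons_of_mem _ hln)]

-- bmse in mode some up to and including the first sentinel line
theorem bmse_some_append_sent (method e s : String) (pre rest : List String)
    (hpre : ∀ ln ∈ pre, (PySem.Str.rstrip ln == e) = false) (hs : (PySem.Str.rstrip s == e) = true) :
    bmse method (some e) (pre ++ s :: rest)
      = pre ++ ("\t\t// END " ++ method ++ " //") :: s :: bmse method none rest := by
  induction pre with
  | nil => simp only [List.nil_append]; rw [bmse, if_pos hs]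
  | cons p pre ih =>
    simp only [List.cons_append]
    rw [bmse, if_neg (by rw [hpre p (List.mem_cons_self)]; exact Bool.false_ne_true),
      ih fun ln hln => hpre ln (List.mem_cons_of_mem _ hln)]

-- elements strictly before the index found by findIdx? all fail the predicate
theorem take_all_neg {α : Type} (p : α → Bool) (ls : List α) (k : Nat)
    (h : ls.findIdx? p = some k) : ∀ x ∈ ls.take k, p x = false := by
  obtain ⟨hk, _, hlt⟩ := List.findIdx?_eq_some_iff_getElem.mp h
  intro x hx
  obtain ⟨j, hj, rfl⟩ := List.mem_iff_getElem.mp hx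
  have hj' : j < k := by
    have := hj
    simp only [List.length_take, lt_min_iff] at this
    exact this.1
  have : (ls.take k)[j] = ls[j]'(by omega) := List.getElem_take ..
  rw [this]
  simpa using hlt j hj'

-- the segment recursions equal B's find-and-splice loop
theorem bmse_eq_bEmit (method : String) (fuel : Nat) (ls : List String)
    (hfuel : ls.length ≤ fuel) : bmse method none ls = bEmit method fuel ls := by
  induction fuel generalizing ls with
  | zero =>
    have : ls = [] := by
      cases ls with
      | nil => rfl
      | cons a t => simp at hfuel
    subst this
    rw [bmse, bEmit]
  | succ fuel ih =>
    rw [bEmit]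
    match hk : ls.findIdx? (bTrig method) with
    | none =>
      rw [bmse_none_all_neg method ls
        (by intro ln hln; simpa using List.findIdx?_eq_none_iff.mp hk ln hln)]
    | some k =>
      obtain ⟨hklen, hkp, _⟩ := List.findIdx?_eq_some_iff_getElem.mp hk
      have hgetD : ls.getD k "" = ls[k] := List.getD_eq_getElem ls "" hklen
      have hdecomp : ls = ls.take k ++ ls[k] :: ls.drop (k + 1) := by
        conv_lhs => rw [← List.take_append_drop k ls]
        rw [List.getElem_cons_drop]
      have htake1 : ls.take (k + 1) = ls.take k ++ [ls[k]] := by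
        rw [List.take_add_one, List.getElem?_eq_getElem hklen]; rfl
      have hgo : bmse method none ls
          = ls.take k ++ ls[k] :: ("\t\t// BEGIN " ++ method ++ " //")
              :: bmse method (some (bSentinel ls[k])) (ls.drop (k + 1)) := by
        conv_lhs => rw [hdecomp]
        exact bmse_none_append_trig method ls[k] _ _ (take_all_neg _ ls k hk) hkp
      dsimp only
      rw [hgetD]
      match hj : (ls.drop (k + 1)).findIdx? (fun ln => PySem.Str.rstrip ln == bSentinel ls[k]) with
      | none =>
        dsimp only
        rw [hgo, bmse_some_all_neg method _ _
          (by intro ln hln; simpa using List.findIdx?_eq_none_iff.mp hj ln hln)]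
        simp only [htake1, List.append_assoc, List.cons_append, List.singleton_append,
          List.nil_append]
      | some j =>
        dsimp only
        obtain ⟨hjlen, hjp, _⟩ := List.findIdx?_eq_some_iff_getElem.mp hj
        have hbdecomp : ls.drop (k + 1)
            = (ls.drop (k + 1)).take j ++ (ls.drop (k + 1))[j] :: (ls.drop (k + 1)).drop (j + 1) := by
          conv_lhs => rw [← List.take_append_drop j (ls.drop (k + 1))]
          rw [List.getElem_cons_drop]
        have hgetDj : (ls.drop (k + 1)).getD j "" = (ls.drop (k + 1))[j] :=
          List.getD_eq_getElem _ "" hjlen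
        have hinner : bmse method (some (bSentinel ls[k])) (ls.drop (k + 1))
            = (ls.drop (k + 1)).take j ++ ("\t\t// END " ++ method ++ " //")
                :: (ls.drop (k + 1))[j] :: bmse method none ((ls.drop (k + 1)).drop (j + 1)) := by
          conv_lhs => rw [hbdecomp]
          exact bmse_some_append_sent method _ _ _ _ (take_all_neg _ _ j hj) hjp
        have hrec : bmse method none ((ls.drop (k + 1)).drop (j + 1))
            = bEmit method fuel ((ls.drop (k + 1)).drop (j + 1)) := by
          apply ih
          simp only [List.length_drop]
          omega
        rw [hgo, hinner, hrec, hgetDj]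
        simp only [htake1, List.append_assoc, List.cons_append, List.singleton_append,
          List.nil_append]

-- ===== VERDICT (by name: the statement is the Claim_ definition above) =====
theorem add_method_start_end_spec : Claim_equal_add_method_start_end := by
  intro text method _
  show add_method_start_end text method = add_method_start_end_alt text method
  unfold add_method_start_end add_method_start_end_alt
  generalize (PySem.Chars.splitOn text.toList ['\n']).map (fun cs => String.ofList cs) = ls
  rw [PySem.List.foldl_pyRange_zero_pyGetD]
  rw [(foldA_eq_bmse method ls).1 [] none, bmse_eq_bEmit method ls.length ls le_rfl]
  simp
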